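-- pv_equiv track=rewrite | github.com/EcoFriendlyAppleSu/algo | level01/Level01_24.py | numberToBinary
-- ===== SOURCE A (Python) =====
-- def numberToBinary(number, n):
--     binary = []
--     while number > 0:
--         binary.append(number % 2)
--         number //= 2
--     while len(binary) < n:
--         binary.append(0)
--         if len(binary) == n:
--             break
--     return list(reversed(binary))
-- ===== SOURCE B (Python) =====
-- def numberToBinary(number, n):
--     if number <= 0:
--         return [0] * max(n, 0)
--     return [int(c) for c in format(number, '0{}b'.format(max(n, 0)))]
-- ===== Notes on version B (the rewrite author's own statement) =====
-- stated objective: idiomatic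
-- what changed: Replaces the divide-by-2 digit-extraction loop plus padding loop plus final reverse with Python's zero-padded binary string formatting parsed into a digit list, with a direct zeros list for non-positive numbers.
import Mathlib
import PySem

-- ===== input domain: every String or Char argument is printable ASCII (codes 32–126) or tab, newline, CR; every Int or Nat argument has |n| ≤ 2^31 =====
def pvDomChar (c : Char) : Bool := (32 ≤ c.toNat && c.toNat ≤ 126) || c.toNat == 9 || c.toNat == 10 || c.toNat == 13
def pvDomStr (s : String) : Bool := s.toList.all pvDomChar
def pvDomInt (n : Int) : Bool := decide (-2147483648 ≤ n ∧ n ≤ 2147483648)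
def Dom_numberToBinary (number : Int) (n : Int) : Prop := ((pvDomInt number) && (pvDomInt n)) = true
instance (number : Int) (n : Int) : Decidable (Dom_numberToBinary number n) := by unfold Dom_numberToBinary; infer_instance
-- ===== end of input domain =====

-- B replaces A's divide-by-2 extraction loop, padding loop and final reverse by
-- formatting the number as a zero-padded binary string (zeros branch for non-positive
-- numbers); this is an idiomatic alternative, not claimed faster.


-- ===== PORT A =====
-- while number > 0: binary.append(number % 2); number //= 2
def pvBitLoop (number : Int) (binary : List Int) : List Int :=
  if h : number > 0 then
    pvBitLoop (PySem.Int.floordiv number 2) (binary ++ [PySem.Int.mod number 2])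
  else binary
termination_by number.toNat
decreasing_by
  rw [PySem.Int.floordiv_eq_ediv_of_pos (by omega)]
  omega

-- while len(binary) < n: binary.append(0); if len(binary) == n: break
def pvPadLoop (binary : List Int) (n : Int) : List Int :=
  if h : (binary.length : Int) < n then
    let b := binary ++ [(0 : Int)]
    if (b.length : Int) = n then b else pvPadLoop b n
  else binary
termination_by (n - binary.length).toNat
decreasing_by
  simp
  omega

def numberToBinary (number : Int) (n : Int) : List Int :=
  (pvPadLoop (pvBitLoop number []) n).reverse

-- ===== PORT B =====
-- binary digits of m, most-significant first: the digit part of format(m, 'b')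
def pvNatBits (m : Nat) : List Int :=
  if m = 0 then [] else pvNatBits (m / 2) ++ [((m % 2 : Nat) : Int)]

-- [int(c) for c in format(number, '0{}b'.format(max(n, 0)))] : left zero-pad to width
def numberToBinary_alt (number : Int) (n : Int) : List Int :=
  if number ≤ 0 then List.replicate (max n 0).toNat 0
  else
    let s := pvNatBits number.toNat
    List.replicate ((max n 0).toNat - s.length) 0 ++ s

-- ===== PRECONDITION & SPEC =====
def Spec_numberToBinary (number : Int) (n : Int) (out : List Int) : Prop := out = numberToBinary_alt number n
instance (number : Int) (n : Int) (out : List Int) : Decidable (Spec_numberToBinary number n out) := by unfold Spec_numberToBinary; infer_instance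

-- ===== CLAIM (what is proved, stated in full; the proofs are below) =====
def Claim_equal_numberToBinary : Prop := ∀ (number : Int) (n : Int), Dom_numberToBinary number n → Spec_numberToBinary number n (numberToBinary number n)

-- ===== LEMMAS AND PROOFS =====

theorem pvBitLoop_eq (m : Int) (acc : List Int) :
    pvBitLoop m acc = acc ++ (pvNatBits m.toNat).reverse := by
  by_cases h : m > 0
  · rw [pvBitLoop.eq_def]
    simp only [h, dite_true]
    have h2 : (PySem.Int.floordiv m 2).toNat = m.toNat / 2 := by
      rw [PySem.Int.floordiv_eq_ediv_of_pos (by omega)]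
      omega
    have h3 : PySem.Int.mod m 2 = ((m.toNat % 2 : Nat) : Int) := by
      rw [PySem.Int.mod_eq_emod_of_pos (by omega)]
      omega
    have h4 : m.toNat ≠ 0 := by omega
    rw [pvBitLoop_eq, h2, h3]
    conv_rhs => rw [pvNatBits]
    simp [h4]
  · rw [pvBitLoop.eq_def]
    have h4 : m.toNat = 0 := by omega
    rw [pvNatBits]
    simp [h, h4]
termination_by m.toNat
decreasing_by
  rw [PySem.Int.floordiv_eq_ediv_of_pos (by omega)]
  omega

theorem pvPadLoop_eq (b : List Int) (n : Int) :
    pvPadLoop b n = b ++ List.replicate (n - b.length).toNat 0 := by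
  by_cases h : (b.length : Int) < n
  · rw [pvPadLoop.eq_def]
    simp only [h, dite_true]
    by_cases h2 : ((b ++ [(0:Int)]).length : Int) = n
    · simp only [h2, if_true]
      have : (n - (b.length : Int)).toNat = 1 := by simp at h2; omega
      simp [this]
    · simp only [h2, if_false]
      rw [pvPadLoop_eq]
      have : (n - ((b ++ [(0:Int)]).length : Int)).toNat + 1 = (n - b.length).toNat := by
        simp at h2 ⊢; omega
      rw [← this, List.replicate_succ]
      simp
  · rw [pvPadLoop.eq_def]
    have : (n - (b.length : Int)).toNat = 0 := by omega
    simp [h, this]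
termination_by (n - b.length).toNat
decreasing_by
  simp
  omega

-- ===== VERDICT (by name: the statement is the Claim_ definition above) =====
theorem numberToBinary_spec : Claim_equal_numberToBinary := by
  intro number n _
  unfold Spec_numberToBinary numberToBinary numberToBinary_alt
  rw [pvBitLoop_eq, pvPadLoop_eq]
  simp only [List.nil_append, List.reverse_append, List.reverse_reverse,
    List.reverse_replicate, List.length_reverse]
  by_cases h : number ≤ 0
  · have h0 : number.toNat = 0 := by omega
    rw [pvNatBits]
    simp [h, h0]
    rw [Int.max_def]
    split_ifs <;> omega
  · have heq : (n - ((pvNatBits number.toNat).length : Int)).toNat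
        = (max n 0).toNat - (pvNatBits number.toNat).length := by
      rw [Int.max_def]; split_ifs <;> omega
    simp [h, heq]
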